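-- pv_equiv track=rewrite | github.com/SpangleLabs/Hallo | hallobase.py | fnn_calc_after
-- ===== SOURCE A (Python) =====
-- def fnn_calc_after(calc, sub):
--     pos = calc.find(str(sub))
--     if len(calc) <= pos+len(sub):
--         return ''
--     post_calc = calc[pos+len(sub):]
--     num = ''
--     if(post_calc[0].isdigit() or post_calc[0]=='.' or post_calc[0]=='-'):
--         num = num + post_calc[0]
--         for nextchar in post_calc[1:]:
--             if(nextchar.isdigit() or nextchar == '.'):
--                 num = num + nextchar
--             else:
--                 break
--     return num
-- ===== SOURCE B (Python) =====
-- def fnn_calc_after(calc, sub):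
--     sub = str(sub)
--     pos = calc.find(sub)
--     if len(calc) <= pos + len(sub):
--         return ''
--     post = calc[pos + len(sub):]
--     if not (post[0].isdigit() or post[0] in ('.', '-')):
--         return ''
--     end = next((i for i in range(1, len(post))
--                 if not (post[i].isdigit() or post[i] == '.')), len(post))
--     return post[:end]
-- ===== Notes on version B (the rewrite author's own statement) =====
-- stated objective: idiomatic
-- what changed: A builds the number with an accumulate-and-break character loop; B instead locates the first non-number character (next over a generator, default len) and returns the slice up to it.
import Mathlib
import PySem

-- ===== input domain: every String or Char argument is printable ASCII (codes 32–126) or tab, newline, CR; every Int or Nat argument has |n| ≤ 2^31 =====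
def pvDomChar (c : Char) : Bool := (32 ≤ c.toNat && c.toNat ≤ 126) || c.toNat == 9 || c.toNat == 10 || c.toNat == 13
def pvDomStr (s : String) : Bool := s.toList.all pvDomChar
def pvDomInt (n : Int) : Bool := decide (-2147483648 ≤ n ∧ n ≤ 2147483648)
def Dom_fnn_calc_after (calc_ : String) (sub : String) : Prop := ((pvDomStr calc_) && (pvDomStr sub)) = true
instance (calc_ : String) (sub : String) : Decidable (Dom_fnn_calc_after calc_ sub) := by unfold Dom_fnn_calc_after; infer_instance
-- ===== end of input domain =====

-- B replaces A's accumulate-with-break character loop by "find the first non-number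
-- character, then slice the prefix" (idiomatic; same cost).

-- ===== PORT A =====
-- A's for-loop with break: append each digit/'.' to the accumulator, stop at the first other char
def fnnLoopA : List Char → List Char → List Char
  | [], num => num
  | c :: rest, num =>
      if PySem.Chars.isdigit c || c == '.' then fnnLoopA rest (num ++ [c]) else num

def fnn_calc_after (calc_ : String) (sub : String) : String :=
  let cs := calc_.toList
  let sb := sub.toList
  let pos := PySem.Chars.find cs sb
  if (cs.length : Int) ≤ pos + (sb.length : Int) then ""
  else
    match PySem.Chars.slice cs (some (pos + (sb.length : Int))) none with
    | [] => ""  -- unreachable: the guard above ensures post_calc is nonempty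
    | c0 :: rest =>
      if PySem.Chars.isdigit c0 || c0 == '.' || c0 == '-' then
        String.ofList (fnnLoopA rest [c0])
      else ""

-- ===== PORT B =====
def fnn_calc_after_alt (calc_ : String) (sub : String) : String :=
  let cs := calc_.toList
  let sb := sub.toList
  let pos := PySem.Chars.find cs sb
  if (cs.length : Int) ≤ pos + (sb.length : Int) then ""
  else
    match PySem.Chars.slice cs (some (pos + (sb.length : Int))) none with
    | [] => ""  -- unreachable: the guard above ensures post is nonempty
    | c0 :: rest =>
      if !(PySem.Chars.isdigit c0 || (c0 == '.' || c0 == '-')) then ""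
      else
        -- next(i for i in range(1,len(post)) if post[i] not a number char), default len(post)
        match rest.findIdx? (fun ch => !(PySem.Chars.isdigit ch || ch == '.')) with
        | some j => String.ofList ((c0 :: rest).take (1 + j))
        | none => String.ofList (c0 :: rest)

-- ===== PRECONDITION & SPEC =====
def Spec_fnn_calc_after (calc_ : String) (sub : String) (out : String) : Prop := out = fnn_calc_after_alt calc_ sub
instance (calc_ : String) (sub : String) (out : String) : Decidable (Spec_fnn_calc_after calc_ sub out) := by unfold Spec_fnn_calc_after; infer_instance

-- ===== CLAIM (what is proved, stated in full; the proofs are below) =====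
def Claim_equal_fnn_calc_after : Prop := ∀ (calc_ : String) (sub : String), Dom_fnn_calc_after calc_ sub → Spec_fnn_calc_after calc_ sub (fnn_calc_after calc_ sub)

-- ===== LEMMAS AND PROOFS =====

lemma fnnLoopA_eq_takeWhile (l : List Char) :
    ∀ acc, fnnLoopA l acc = acc ++ l.takeWhile (fun c => PySem.Chars.isdigit c || c == '.') := by
  induction l with
  | nil => intro acc; simp [fnnLoopA]
  | cons c rest ih =>
      intro acc
      by_cases h : (PySem.Chars.isdigit c || c == '.') = true
      · simp [fnnLoopA, h, ih]
      · simp [Bool.not_eq_true] at h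
        simp [fnnLoopA, h]

lemma takeWhile_of_findIdx?_none (p : Char → Bool) (l : List Char)
    (h : l.findIdx? (fun c => !(p c)) = none) : l.takeWhile p = l := by
  refine List.takeWhile_eq_self_iff.mpr ?_
  intro x hx
  have := (List.findIdx?_eq_none_iff.mp h) x hx
  simpa using this

lemma takeWhile_of_findIdx?_some (p : Char → Bool) (l : List Char) (j : Nat)
    (h : l.findIdx? (fun c => !(p c)) = some j) : l.takeWhile p = l.take j := by
  induction l generalizing j with
  | nil => simp at h
  | cons c rest ih =>
      simp only [List.findIdx?_cons] at h
      by_cases hc : p c = true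
      · simp [hc] at h
        obtain ⟨j', hf, rfl⟩ := h
        simp [hc, ih j' hf]
      · simp [Bool.not_eq_true] at hc
        simp [hc] at h
        subst h
        simp [hc]

-- ===== VERDICT (by name: the statement is the Claim_ definition above) =====
theorem fnn_calc_after_spec : Claim_equal_fnn_calc_after := by
  intro calc_ sub _
  unfold Spec_fnn_calc_after fnn_calc_after fnn_calc_after_alt
  by_cases hg : ((calc_.toList.length : Int) ≤
      PySem.Chars.find calc_.toList sub.toList + (sub.toList.length : Int))
  · rw [if_pos hg, if_pos hg]
  · rw [if_neg hg, if_neg hg]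
    cases hpost : PySem.Chars.slice calc_.toList
        (some (PySem.Chars.find calc_.toList sub.toList + (sub.toList.length : Int))) none with
    | nil => rfl
    | cons c0 rest =>
      dsimp only
      by_cases hc : (PySem.Chars.isdigit c0 || c0 == '.' || c0 == '-') = true
      · have hc' : (!(PySem.Chars.isdigit c0 || (c0 == '.' || c0 == '-'))) = false := by
          simp [Bool.or_assoc] at hc ⊢
          intro h1 h2
          rcases hc with h | h | h
          · rw [h] at h1; cases h1
          · exact absurd h h2
          · exact h
        rw [if_pos hc, if_neg (by simp [hc'])]
        cases hf : rest.findIdx? (fun ch => !(PySem.Chars.isdigit ch || ch == '.')) with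
        | none =>
            rw [fnnLoopA_eq_takeWhile,
              takeWhile_of_findIdx?_none (fun c => PySem.Chars.isdigit c || c == '.') rest hf]
            rfl
        | some j =>
            rw [fnnLoopA_eq_takeWhile,
              takeWhile_of_findIdx?_some (fun c => PySem.Chars.isdigit c || c == '.') rest j hf]
            simp [Nat.add_comm 1 j]
      · have hc' : (!(PySem.Chars.isdigit c0 || (c0 == '.' || c0 == '-'))) = true := by
          simp only [Bool.or_assoc] at hc
          simp [Bool.not_eq_true] at hc ⊢
          exact hc
        rw [if_neg hc, if_pos hc']
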